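-- pv_equiv track=rewrite | github.com/jccsvq/mesomath | mesomath/npvs.py | cmul
-- ===== SOURCE A (Python) =====
-- def cmul(x):
--     '''Utility function. Returns list of cumulative products of the factor list x
--
--     Example: cmul([4,3,3,22,10,8,3]) returns:
--          [1, 4, 12, 36, 792, 7920, 63360, 190080]'''
--     if type(x) == list :
--         prod = 1
--         prodl =[1]
--         for i in x :
--             prod *= i
--             prodl.append(prod)
--         return prodl
-- ===== SOURCE B (Python) =====
-- import math
--
-- def cmul(x):
--     if type(x) == list:
--         return [math.prod(x[:i]) for i in range(len(x) + 1)]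
-- ===== Notes on version B (the rewrite author's own statement) =====
-- stated objective: alternative
-- what changed: Replaces the running-product accumulator loop with an independent closed-form prefix product math.prod(x[:i]) for each index of range(len(x)+1).
import Mathlib
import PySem

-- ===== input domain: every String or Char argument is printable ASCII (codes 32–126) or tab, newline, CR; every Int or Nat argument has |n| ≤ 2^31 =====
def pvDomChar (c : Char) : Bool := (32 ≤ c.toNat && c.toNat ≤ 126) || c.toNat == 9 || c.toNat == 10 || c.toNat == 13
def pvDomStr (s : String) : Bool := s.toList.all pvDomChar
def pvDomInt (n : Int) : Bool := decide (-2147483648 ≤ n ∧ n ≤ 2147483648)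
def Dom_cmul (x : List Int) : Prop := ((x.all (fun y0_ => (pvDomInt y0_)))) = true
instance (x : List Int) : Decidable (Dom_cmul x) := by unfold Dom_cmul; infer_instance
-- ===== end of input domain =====

-- ===== PORT A =====
-- A: one pass maintaining a running product, appending each new product.
-- The Lean domain is already List Int, so A's 'type(x)==list' branch always holds.
def cmul (x : List Int) : List Int :=
  (x.foldl (fun (st : Int × List Int) i => (st.1 * i, st.2 ++ [st.1 * i])) (1, [1])).2

-- ===== PORT B =====
-- B: each prefix product computed independently; x[:i] for 0 ≤ i is List.take i.
def cmul_alt (x : List Int) : List Int :=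
  (List.range (x.length + 1)).map (fun i => (x.take i).prod)

-- ===== PRECONDITION & SPEC =====
def Spec_cmul (x : List Int) (out : List Int) : Prop := out = cmul_alt x
instance (x : List Int) (out : List Int) : Decidable (Spec_cmul x out) := by unfold Spec_cmul; infer_instance

-- ===== CLAIM (what is proved, stated in full; the proofs are below) =====
def Claim_equal_cmul : Prop := ∀ (x : List Int), Dom_cmul x → Spec_cmul x (cmul x)

-- ===== LEMMAS AND PROOFS =====

lemma cmul_loop (x : List Int) (p : Int) (l : List Int) :
    (x.foldl (fun (st : Int × List Int) i => (st.1 * i, st.2 ++ [st.1 * i])) (p, l)).2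
      = l ++ (List.range x.length).map (fun i => p * (x.take (i + 1)).prod) := by
  induction x generalizing p l with
  | nil => simp
  | cons a t ih =>
    simp only [List.foldl_cons, ih, List.length_cons, List.range_succ_eq_map,
      List.map_cons, List.map_map]
    simp [Function.comp, mul_assoc, List.append_assoc]

-- ===== VERDICT (by name: the statement is the Claim_ definition above) =====
theorem cmul_spec : Claim_equal_cmul := by
  intro x _
  unfold Spec_cmul cmul cmul_alt
  rw [cmul_loop]
  simp [List.range_succ_eq_map, List.map_map, Function.comp]
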